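-- pv_equiv track=rewrite | github.com/dhl84/legion_llm_author | code/preprocessing/labelling.py | get_tone
-- ===== SOURCE A (Python) =====
-- def get_tone(text):
--     positive_words = ['happy', 'joy', 'love', 'excited']
--     negative_words = ['sad', 'angry', 'fear', 'dark']
--
--     pos_count = sum(1 for word in text.lower().split() if word in positive_words)
--     neg_count = sum(1 for word in text.lower().split() if word in negative_words)
--
--     if pos_count > neg_count:
--         return 'positive'
--     elif neg_count > pos_count:
--         return 'negative'
--     else:
--         return 'neutral'
-- ===== SOURCE B (Python) =====
-- def get_tone(text):
--     weights = {'happy': 1, 'joy': 1, 'love': 1, 'excited': 1,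
--                'sad': -1, 'angry': -1, 'fear': -1, 'dark': -1}
--     score = sum(weights.get(word, 0) for word in text.lower().split())
--     if score > 0:
--         return 'positive'
--     if score < 0:
--         return 'negative'
--     return 'neutral'
-- ===== Notes on version B (the rewrite author's own statement) =====
-- stated objective: simpler
-- what changed: B replaces A's two separate positive/negative word lists and two lower+split+scan counting passes with a single signed weight dictionary (+1/-1) and one summed score whose sign decides the tone; the two-counter comparison disappears.
import Mathlib
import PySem

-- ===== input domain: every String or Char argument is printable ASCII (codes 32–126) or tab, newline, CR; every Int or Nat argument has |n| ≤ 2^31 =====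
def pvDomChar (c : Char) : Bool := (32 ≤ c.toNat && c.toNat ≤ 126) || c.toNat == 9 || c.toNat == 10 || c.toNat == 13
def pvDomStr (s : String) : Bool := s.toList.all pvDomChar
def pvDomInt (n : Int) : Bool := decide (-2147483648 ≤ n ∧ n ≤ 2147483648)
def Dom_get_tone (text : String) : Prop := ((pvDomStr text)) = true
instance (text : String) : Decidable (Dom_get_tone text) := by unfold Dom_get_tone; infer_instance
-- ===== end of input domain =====

-- B replaces A's two word lists and two counting passes by one signed weight dictionary
-- and a single summed score whose sign decides the tone (objective: simpler).

-- ===== PORT A =====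
def pvPosWords : List String := ["happy", "joy", "love", "excited"]
def pvNegWords : List String := ["sad", "angry", "fear", "dark"]

def get_tone (text : String) : String :=
  -- pos_count = sum(1 for word in text.lower().split() if word in positive_words)
  let pos_count : Int :=
    (PySem.Str.split₀ (PySem.Str.lower text)).foldl
      (fun acc word => if pvPosWords.contains word then acc + 1 else acc) 0
  -- neg_count = sum(1 for word in text.lower().split() if word in negative_words)
  let neg_count : Int :=
    (PySem.Str.split₀ (PySem.Str.lower text)).foldl
      (fun acc word => if pvNegWords.contains word then acc + 1 else acc) 0
  if pos_count > neg_count then "positive"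
  else if neg_count > pos_count then "negative"
  else "neutral"

-- ===== PORT B =====
def pvWeights : PySem.Dict String Int :=
  PySem.Dict.ofList [("happy", 1), ("joy", 1), ("love", 1), ("excited", 1),
                     ("sad", -1), ("angry", -1), ("fear", -1), ("dark", -1)]

def get_tone_alt (text : String) : String :=
  -- score = sum(weights.get(word, 0) for word in text.lower().split())
  let score : Int :=
    (PySem.Str.split₀ (PySem.Str.lower text)).foldl
      (fun s word => s + pvWeights.getD word 0) 0
  if score > 0 then "positive"
  else if score < 0 then "negative"
  else "neutral"

-- ===== PRECONDITION & SPEC =====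
def Spec_get_tone (text : String) (out : String) : Prop := out = get_tone_alt text
instance (text : String) (out : String) : Decidable (Spec_get_tone text out) := by unfold Spec_get_tone; infer_instance

-- ===== CLAIM (what is proved, stated in full; the proofs are below) =====
def Claim_equal_get_tone : Prop := ∀ (text : String), Dom_get_tone text → Spec_get_tone text (get_tone text)

-- ===== LEMMAS AND PROOFS =====

-- the weight of a word is +1 on the positive list, -1 on the negative list, 0 otherwise
lemma pv_weight (w : String) :
    pvWeights.getD w 0 =
      (if pvPosWords.contains w then (1 : Int)
       else if pvNegWords.contains w then -1 else 0) := by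
  have hd : pvWeights = PySem.Dict.mk
      [("happy", 1), ("joy", 1), ("love", 1), ("excited", 1),
       ("sad", -1), ("angry", -1), ("fear", -1), ("dark", -1)] := by decide
  by_cases h1 : w = "happy"
  · subst h1; decide
  by_cases h2 : w = "joy"
  · subst h2; decide
  by_cases h3 : w = "love"
  · subst h3; decide
  by_cases h4 : w = "excited"
  · subst h4; decide
  by_cases h5 : w = "sad"
  · subst h5; decide
  by_cases h6 : w = "angry"
  · subst h6; decide
  by_cases h7 : w = "fear"
  · subst h7; decide
  by_cases h8 : w = "dark"
  · subst h8; decide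
  have b1 : (("happy":String) == w) = false := by simp [Ne.symm h1]
  have b2 : (("joy":String) == w) = false := by simp [Ne.symm h2]
  have b3 : (("love":String) == w) = false := by simp [Ne.symm h3]
  have b4 : (("excited":String) == w) = false := by simp [Ne.symm h4]
  have b5 : (("sad":String) == w) = false := by simp [Ne.symm h5]
  have b6 : (("angry":String) == w) = false := by simp [Ne.symm h6]
  have b7 : (("fear":String) == w) = false := by simp [Ne.symm h7]
  have b8 : (("dark":String) == w) = false := by simp [Ne.symm h8]
  have c1 : ((w:String) == "happy") = false := by simp [h1]
  have c2 : ((w:String) == "joy") = false := by simp [h2]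
  have c3 : ((w:String) == "love") = false := by simp [h3]
  have c4 : ((w:String) == "excited") = false := by simp [h4]
  have c5 : ((w:String) == "sad") = false := by simp [h5]
  have c6 : ((w:String) == "angry") = false := by simp [h6]
  have c7 : ((w:String) == "fear") = false := by simp [h7]
  have c8 : ((w:String) == "dark") = false := by simp [h8]
  simp [hd, pvPosWords, pvNegWords, PySem.Dict.getD, PySem.Dict.get?, List.find?,
    List.contains, List.elem,
    b1, b2, b3, b4, b5, b6, b7, b8, c1, c2, c3, c4, c5, c6, c7, c8]

-- the score fold equals the positive-count fold minus the negative-count fold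
lemma pv_fold (ws : List String) (p n : Int) :
    ws.foldl (fun s word => s + pvWeights.getD word 0) (p - n)
      = ws.foldl (fun acc word => if pvPosWords.contains word then acc + 1 else acc) p
        - ws.foldl (fun acc word => if pvNegWords.contains word then acc + 1 else acc) n := by
  induction ws generalizing p n with
  | nil => rfl
  | cons w ws ih =>
    simp only [List.foldl]
    rw [pv_weight w]
    by_cases hp : pvPosWords.contains w = true
    · have hn : pvNegWords.contains w = false := by
        have hmem : w ∈ pvPosWords := by simpa using hp
        simp only [pvPosWords, List.mem_cons, List.not_mem_nil, or_false] at hmem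
        rcases hmem with h | h | h | h <;> (subst h; decide)
      rw [hp, hn]
      have he : p - n + 1 = (p + 1) - n := by ring
      simp only [if_true, Bool.false_eq_true, if_false, he]
      exact ih (p + 1) n
    · rw [eq_false_of_ne_true hp]
      by_cases hn : pvNegWords.contains w = true
      · rw [hn]
        have he : p - n + -1 = p - (n + 1) := by ring
        simp only [Bool.false_eq_true, if_false, if_true, he]
        exact ih p (n + 1)
      · rw [eq_false_of_ne_true hn]
        simp only [Bool.false_eq_true, if_false, add_zero]
        exact ih p n

-- ===== VERDICT (by name: the statement is the Claim_ definition above) =====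
theorem get_tone_spec : Claim_equal_get_tone := by
  intro text _
  unfold Spec_get_tone get_tone get_tone_alt
  have h := pv_fold (PySem.Str.split₀ (PySem.Str.lower text)) 0 0
  simp only [sub_zero] at h
  simp only [h]
  split_ifs <;> first | rfl | omega
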